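-- pv_equiv track=rewrite | github.com/dyuthi-reddy/Playfaircipher | playfairtrail.py | cleanplaintext
-- ===== SOURCE A (Python) =====
-- def cleanplaintext(iplaintext):
--     if " " in iplaintext:
--      iplaintext = iplaintext.replace(" ","")
--     mplaintext = ""
--
--     for letindex in range(len(iplaintext)-1):
--
--          if iplaintext[letindex] == iplaintext[letindex+1]:
--             mplaintext =  mplaintext+iplaintext[letindex]+"x"
--          else:
--             mplaintext = mplaintext+iplaintext[letindex]
--
--     mplaintext = mplaintext+iplaintext[-1]
--     return mplaintext
-- ===== SOURCE B (Python) =====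
-- def cleanplaintext(iplaintext):
--     s = iplaintext.replace(" ", "")
--     pieces = []
--     i = 0
--     n = len(s)
--     while i < n:
--         j = i
--         while j < n and s[j] == s[i]:
--             j += 1
--         pieces.append("x".join(s[i] * (j - i)))
--         i = j
--     return "".join(pieces)
-- ===== Notes on version B (the rewrite author's own statement) =====
-- stated objective: faster
-- what changed: Replaces A's pairwise index loop with quadratic string concatenation by a run-length scan: strip spaces, split into maximal runs of equal characters, join each run with the letter x, and join the collected pieces once at the end.
import Mathlib
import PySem

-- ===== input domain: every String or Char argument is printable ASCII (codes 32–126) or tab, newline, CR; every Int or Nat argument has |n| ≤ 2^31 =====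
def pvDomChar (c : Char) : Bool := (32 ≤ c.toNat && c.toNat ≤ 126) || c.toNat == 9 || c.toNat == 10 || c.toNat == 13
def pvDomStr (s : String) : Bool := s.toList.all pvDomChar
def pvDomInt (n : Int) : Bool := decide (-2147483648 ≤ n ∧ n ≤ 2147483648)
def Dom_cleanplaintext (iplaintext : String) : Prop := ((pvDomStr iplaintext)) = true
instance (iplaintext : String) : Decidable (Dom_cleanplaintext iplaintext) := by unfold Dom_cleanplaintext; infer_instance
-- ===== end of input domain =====

-- B replaces A's pairwise index loop (quadratic repeated string concatenation) by a run-length scan with a single join; measured faster in a timing run.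
-- On empty / all-space input A raises IndexError (iplaintext[-1]); those inputs are excluded by Pre_ (B's return value only is claimed).


-- ===== PORT A =====
-- literal transliteration; strings are ported on List Char via PySem.Chars (exact on Dom).
-- iplaintext[-1] is pyGet? (-1): none = IndexError on the empty string, excluded by Pre_.
def cleanplaintext (iplaintext : String) : String :=
  let ip := if PySem.Str.isIn " " iplaintext then PySem.Str.replace iplaintext " " "" else iplaintext
  let l := ip.toList
  let m := (PySem.List.pyRange 0 ((l.length : Int) - 1) 1).foldl
    (fun m i =>
      if PySem.List.pyGetD l i ' ' = PySem.List.pyGetD l (i + 1) ' '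
      then m ++ [PySem.List.pyGetD l i ' ', 'x']
      else m ++ [PySem.List.pyGetD l i ' ']) ([] : List Char)
  String.ofList (m ++ (PySem.List.pyGet? l (-1)).toList)

-- ===== PORT B =====
-- inner while loop of Source B: length of the leading run of c, and the rest
def pvTakeRun (c : Char) : List Char → Nat × List Char
  | [] => (0, [])
  | x :: xs => if x = c then ((pvTakeRun c xs).1 + 1, (pvTakeRun c xs).2) else (0, x :: xs)

theorem pvTakeRun_len (c : Char) (xs : List Char) : (pvTakeRun c xs).2.length ≤ xs.length := by
  induction xs with
  | nil => simp [pvTakeRun]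
  | cons x xs ih => by_cases h : x = c <;> simp [pvTakeRun, h] <;> omega

-- outer while loop of Source B: one piece "x".join(c*(j-i)) per maximal run
def pvRunScan : List Char → List (List Char)
  | [] => []
  | c :: rest =>
    PySem.Chars.join ['x'] (List.replicate ((pvTakeRun c rest).1 + 1) [c]) :: pvRunScan (pvTakeRun c rest).2
termination_by l => l.length
decreasing_by
  have := pvTakeRun_len c rest
  simp only [List.length_cons]
  omega

def cleanplaintext_alt (iplaintext : String) : String :=
  let s := (PySem.Str.replace iplaintext " " "").toList
  String.ofList (PySem.Chars.join [] (pvRunScan s))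

-- ===== PRECONDITION & SPEC =====
-- Pre_ excludes exactly the inputs on which A raises IndexError: the space-stripped string is empty.
def Pre_cleanplaintext (iplaintext : String) : Prop :=
  (PySem.Str.replace iplaintext " " "").toList ≠ []
instance (iplaintext : String) : Decidable (Pre_cleanplaintext iplaintext) := by
  unfold Pre_cleanplaintext; infer_instance

def pvWitness_cleanplaintext : String := "hello x"

def Spec_cleanplaintext (iplaintext : String) (out : String) : Prop := out = cleanplaintext_alt iplaintext
instance (iplaintext : String) (out : String) : Decidable (Spec_cleanplaintext iplaintext out) := by unfold Spec_cleanplaintext; infer_instance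

-- ===== CLAIM (what is proved, stated in full; the proofs are below) =====
def Claim_equal_cleanplaintext : Prop := ∀ (iplaintext : String), Dom_cleanplaintext iplaintext → Pre_cleanplaintext iplaintext → Spec_cleanplaintext iplaintext (cleanplaintext iplaintext)

-- ===== LEMMAS AND PROOFS =====

-- the common mathematical core: one 'x' after each character equal to its successor
def pvPW : List Char → List Char
  | [] => []
  | [c] => [c]
  | a :: b :: t => (if a = b then [a, 'x'] else [a]) ++ pvPW (b :: t)

-- replace.go leaves the string unchanged when ' ' does not occur in it
theorem pv_go_id (fuel : Nat) (l acc : List Char) (h : ' ' ∉ l) :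
    PySem.Chars.replace.go [' '] [] fuel l acc = acc.reverse ++ l := by
  induction fuel generalizing l acc with
  | zero => simp [PySem.Chars.replace.go]
  | succ n ih =>
    cases l with
    | nil => simp [PySem.Chars.replace.go]
    | cons c t =>
      have hc : c ≠ ' ' := fun hcc => h (hcc ▸ List.mem_cons_self)
      have hp : List.isPrefixOf [' '] (c :: t) = false := by
        simp [List.isPrefixOf]
        exact fun hcc => absurd hcc.symm hc
      simp only [PySem.Chars.replace.go, hp]
      rw [ih t (c :: acc) (fun hm => h (List.mem_cons_of_mem _ hm))]
      simp

-- so A's 'if " " in iplaintext' branch is immaterial: replace is the identity there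
theorem pv_replace_id (l : List Char) (h : ' ' ∉ l) :
    PySem.Chars.replace l [' '] [] = l := by
  simp only [PySem.Chars.replace, List.isEmpty_cons]
  have := pv_go_id l.length l [] h
  simpa using this

-- A's fold, with indices turned into Nat and the last-element append, equals pvPW
theorem pvA_nat (l : List Char) (h : l ≠ []) :
    ((List.range (l.length - 1)).flatMap
      (fun k => if l.getD k ' ' = l.getD (k+1) ' '
                then [l.getD k ' ', 'x'] else [l.getD k ' ']))
      ++ [l.getLast h] = pvPW l := by
  induction l with
  | nil => exact absurd rfl h
  | cons a t ih =>
    cases t with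
    | nil => simp [pvPW]
    | cons b t2 =>
      have hlen : (a :: b :: t2).length - 1 = (b :: t2).length - 1 + 1 := by simp
      rw [hlen, List.range_succ_eq_map, List.flatMap_cons, List.flatMap_map]
      have hg : ∀ k, (fun k => if (a::b::t2).getD k ' ' = (a::b::t2).getD (k+1) ' '
                then [(a::b::t2).getD k ' ', 'x'] else [(a::b::t2).getD k ' ']) (Nat.succ k)
              = (fun k => if (b::t2).getD k ' ' = (b::t2).getD (k+1) ' '
                then [(b::t2).getD k ' ', 'x'] else [(b::t2).getD k ' ']) k := by
        intro k; simp
      rw [funext hg]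
      have hlast : (a :: b :: t2).getLast h = (b :: t2).getLast (by simp) :=
        List.getLast_cons (by simp)
      rw [hlast]
      simp only [List.getD_cons_zero, List.getD_cons_succ] at *
      rw [List.append_assoc, ih (by simp)]
      simp [pvPW]

theorem pvA_core (l : List Char) (h : l ≠ []) :
    ((PySem.List.pyRange 0 ((l.length : Int) - 1) 1).foldl
      (fun m i =>
        if PySem.List.pyGetD l i ' ' = PySem.List.pyGetD l (i + 1) ' '
        then m ++ [PySem.List.pyGetD l i ' ', 'x']
        else m ++ [PySem.List.pyGetD l i ' ']) ([] : List Char))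
      ++ (PySem.List.pyGet? l (-1)).toList = pvPW l := by
  have hb : (fun (m : List Char) (i : Int) =>
        if PySem.List.pyGetD l i ' ' = PySem.List.pyGetD l (i + 1) ' '
        then m ++ [PySem.List.pyGetD l i ' ', 'x']
        else m ++ [PySem.List.pyGetD l i ' '])
      = (fun m i => m ++ (if PySem.List.pyGetD l i ' ' = PySem.List.pyGetD l (i + 1) ' '
        then [PySem.List.pyGetD l i ' ', 'x'] else [PySem.List.pyGetD l i ' '])) := by
    funext m i; split <;> rfl
  rw [hb, PySem.List.foldl_append_eq_flatMap, PySem.List.pyRange_one, List.flatMap_map]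
  have hto : ((l.length : Int) - 1 - 0).toNat = l.length - 1 := by omega
  rw [hto, List.nil_append]
  have hg : (fun (k : Nat) => (if PySem.List.pyGetD l ((0:Int) + k) ' ' = PySem.List.pyGetD l ((0:Int) + k + 1) ' '
        then [PySem.List.pyGetD l ((0:Int) + k) ' ', 'x'] else [PySem.List.pyGetD l ((0:Int) + k) ' ']))
      = (fun k => if l.getD k ' ' = l.getD (k+1) ' ' then [l.getD k ' ', 'x'] else [l.getD k ' ']) := by
    funext k
    have h2 : ((k : Nat) : Int) + 1 = ((k + 1 : Nat) : Int) := by push_cast; ring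
    rw [zero_add, h2, PySem.List.pyGetD_natCast, PySem.List.pyGetD_natCast]
  rw [hg]
  rw [PySem.List.pyGet?_neg_one, List.getLast?_eq_getLast_of_ne_nil h]
  exact pvA_nat l h

theorem pvTakeRun_spec (c : Char) (xs : List Char) :
    xs = List.replicate (pvTakeRun c xs).1 c ++ (pvTakeRun c xs).2
    ∧ (pvTakeRun c xs).2.head? ≠ some c := by
  induction xs with
  | nil => simp [pvTakeRun]
  | cons x xs ih =>
    by_cases h : x = c
    · subst h
      simp only [pvTakeRun, if_true, eq_self_iff_true]
      constructor
      · rw [List.replicate_succ, List.cons_append]; exact congrArg _ ih.1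
      · exact ih.2
    · simp [pvTakeRun, h]

theorem pv_join_nil_cons (p : List Char) (ps : List (List Char)) :
    PySem.Chars.join [] (p :: ps) = p ++ PySem.Chars.join [] ps := by
  cases ps with
  | nil => simp [PySem.Chars.join_singleton, PySem.Chars.join_nil]
  | cons q rest => rw [PySem.Chars.join_cons_cons]; simp

-- pvPW of a maximal run of c followed by r: the run becomes "x".join(c…c)
theorem pv_pw_run (c : Char) (k : Nat) (r : List Char) (h : r.head? ≠ some c) :
    pvPW (List.replicate (k+1) c ++ r)
      = PySem.Chars.join ['x'] (List.replicate (k+1) [c]) ++ pvPW r := by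
  induction k with
  | zero =>
    cases r with
    | nil => simp [pvPW, PySem.Chars.join_singleton]
    | cons y t =>
      have hy : c ≠ y := fun hc => h (by simp [hc])
      simp [pvPW, hy, PySem.Chars.join_singleton]
  | succ n ih =>
    have : List.replicate (n+2) c ++ r = c :: (List.replicate (n+1) c ++ r) := by
      simp [List.replicate_succ]
    rw [this]
    have hcons : List.replicate (n+1) c ++ r = c :: (List.replicate n c ++ r) := by
      simp [List.replicate_succ]
    rw [hcons, pvPW, if_pos rfl]
    rw [← hcons, ih]
    have hj : PySem.Chars.join ['x'] (List.replicate (n+2) [c])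
        = [c] ++ ['x'] ++ PySem.Chars.join ['x'] (List.replicate (n+1) [c]) := by
      rw [show List.replicate (n+2) [c] = [c] :: [c] :: List.replicate n [c] by simp [List.replicate_succ],
        PySem.Chars.join_cons_cons, show List.replicate (n+1) [c] = [c] :: List.replicate n [c] by simp [List.replicate_succ]]
    rw [hj]; simp

theorem pvB_core (l : List Char) :
    PySem.Chars.join [] (pvRunScan l) = pvPW l := by
  induction l using pvRunScan.induct with
  | case1 => simp [pvRunScan, PySem.Chars.join_nil, pvPW]
  | case2 c rest ih =>
    rw [pvRunScan, pv_join_nil_cons, ih]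
    have hs := pvTakeRun_spec c rest
    calc PySem.Chars.join ['x'] (List.replicate ((pvTakeRun c rest).1 + 1) [c]) ++ pvPW (pvTakeRun c rest).2
        = pvPW (List.replicate ((pvTakeRun c rest).1 + 1) c ++ (pvTakeRun c rest).2) :=
          (pv_pw_run c _ _ hs.2).symm
      _ = pvPW (c :: rest) := by
          rw [show List.replicate ((pvTakeRun c rest).1 + 1) c ++ (pvTakeRun c rest).2
              = c :: rest by rw [List.replicate_succ]; simp [← hs.1]]

-- ===== VERDICT (by name: the statement is the Claim_ definition above) =====
theorem cleanplaintext_spec : Claim_equal_cleanplaintext := by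
  intro ip _ hpre
  unfold Spec_cleanplaintext cleanplaintext cleanplaintext_alt
  simp only []
  by_cases hin : PySem.Str.isIn " " ip = true
  · rw [if_pos hin]
    rw [pvA_core _ hpre, pvB_core]
  · rw [if_neg hin]
    have hsp : ' ' ∉ ip.toList := by
      intro hm
      apply hin
      rw [PySem.Str.isIn_eq, PySem.Chars.isIn_iff_infix]
      rcases List.mem_iff_append.mp hm with ⟨s, t, hst⟩
      exact ⟨s, t, by simp [hst]⟩
    have hrep : (PySem.Str.replace ip " " "").toList = ip.toList := by
      rw [PySem.Str.replace]
      simp only [String.toList_ofList]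
      rw [show (" " : String).toList = [' '] from rfl, show ("" : String).toList = [] from rfl]
      exact pv_replace_id _ hsp
    unfold Pre_cleanplaintext at hpre
    rw [hrep] at hpre ⊢
    rw [pvA_core _ hpre, pvB_core]
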